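-- pv_equiv track=rewrite | github.com/wirrexx/paul_exercises | pythonEx_2/printer.py | printer_error
-- ===== SOURCE A (Python) =====
-- def printer_error(s):
--     count = 0
--     letters = 'abcdefghijklm'
--
--     for char in s:
--         if char not in letters:
--             count += 1
--
--     error_rate = f"{count}/{len(s)}"
--
--     return error_rate
--
-- s = "kkkwwwaaaaaaaaaaaaaabbbbbbbbbbbbbbbbbbmmmmmmmmmmmmmmmmmmmxyz"
-- ===== SOURCE B (Python) =====
-- def printer_error(s):
--     # two-stage: build a character-frequency table, then sum the frequencies of
--     # the good letters and subtract from the total length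
--     freq = {}
--     for ch in s:
--         freq[ch] = freq.get(ch, 0) + 1
--     good = 0
--     for c in 'abcdefghijklm':
--         good += freq.get(c, 0)
--     return f"{len(s) - good}/{len(s)}"
-- ===== Notes on version B (the rewrite author's own statement) =====
-- stated objective: alternative
-- what changed: Instead of one pass testing each character's membership in the good set and counting failures, B builds a frequency dictionary of the whole string, sums the frequencies of the 13 good letters, and obtains the error count as length minus that sum.
import Mathlib
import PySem

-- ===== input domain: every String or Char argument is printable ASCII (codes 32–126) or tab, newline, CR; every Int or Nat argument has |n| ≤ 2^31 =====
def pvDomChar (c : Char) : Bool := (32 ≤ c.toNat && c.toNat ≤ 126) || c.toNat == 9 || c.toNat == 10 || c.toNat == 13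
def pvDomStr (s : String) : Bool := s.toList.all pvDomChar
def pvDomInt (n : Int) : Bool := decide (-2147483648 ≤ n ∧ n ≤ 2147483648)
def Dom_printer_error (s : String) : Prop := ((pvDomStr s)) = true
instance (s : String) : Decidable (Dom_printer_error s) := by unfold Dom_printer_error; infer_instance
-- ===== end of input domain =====

-- B replaces A's single membership-testing counting loop by a two-stage computation:
-- a frequency dictionary of the string, then the sum of the good letters' frequencies
-- subtracted from the length (alternative decomposition; same cost).

-- ===== PORT A =====
def printer_error (s : String) : String :=
  let letters := "abcdefghijklm"
  let count : Int := s.toList.foldl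
    (fun count ch => if !(PySem.Str.isIn (String.ofList [ch]) letters) then count + 1 else count) 0
  PySem.Str.join "" [PySem.Int.toStr count, "/", PySem.Int.toStr (PySem.Str.len s)]

-- ===== PORT B =====
def printer_error_alt (s : String) : String :=
  -- freq = {}; for ch in s: freq[ch] = freq.get(ch, 0) + 1
  let freq : PySem.Dict Char Int :=
    s.toList.foldl (fun d ch => d.insert ch (d.getD ch 0 + 1)) PySem.Dict.empty
  -- good = 0; for c in 'abcdefghijklm': good += freq.get(c, 0)
  let good : Int := "abcdefghijklm".toList.foldl (fun g c => g + freq.getD c 0) 0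
  PySem.Str.join ""
    [PySem.Int.toStr (PySem.Str.len s - good), "/", PySem.Int.toStr (PySem.Str.len s)]

-- ===== PRECONDITION & SPEC =====
def Spec_printer_error (s : String) (out : String) : Prop := out = printer_error_alt s
instance (s : String) (out : String) : Decidable (Spec_printer_error s out) := by unfold Spec_printer_error; infer_instance

-- ===== CLAIM (what is proved, stated in full; the proofs are below) =====
def Claim_equal_printer_error : Prop := ∀ (s : String), Dom_printer_error s → Spec_printer_error s (printer_error s)

-- ===== LEMMAS AND PROOFS =====

-- A's counting loop computes the length of a filter.
theorem pv_foldl_count_eq_filter_length (p : Char → Bool) (l : List Char) (n : Int) :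
    l.foldl (fun c ch => if p ch then c + 1 else c) n = n + ((l.filter p).length : Int) := by
  induction l generalizing n with
  | nil => simp
  | cons ch t ih =>
    by_cases h : p ch = true <;> simp [List.foldl_cons, h, ih] <;> ring

-- the single-char substring test of A is list membership
theorem pv_isIn_singleton (ch : Char) (t : String) :
    PySem.Str.isIn (String.ofList [ch]) t = t.toList.contains ch := by
  by_cases h : ch ∈ t.toList
  · have h1 : PySem.Str.isIn (String.ofList [ch]) t = true := by
      rw [PySem.Str.isIn_iff_infix]
      obtain ⟨u, v, huv⟩ := List.append_of_mem h
      exact ⟨u, v, by simp [huv]⟩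
    simpa [h] using h1
  · have h1 : ¬ PySem.Str.isIn (String.ofList [ch]) t = true := by
      rw [PySem.Str.isIn_iff_infix]
      intro hinf
      exact h (hinf.mem (by simp))
    simp only [Bool.not_eq_true] at h1
    simpa [h] using h1

-- indicator sum over a duplicate-free list
theorem pv_sum_indicator (x : Char) (cs : List Char) (h : cs.Nodup) :
    (cs.map (fun c => if x = c then (1 : Int) else 0)).sum
      = if cs.contains x then 1 else 0 := by
  induction cs with
  | nil => simp
  | cons c t ih =>
    rcases List.nodup_cons.mp h with ⟨hc, ht⟩
    by_cases hx : x = c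
    · subst hx
      have hz : (t.map (fun c => if x = c then (1 : Int) else 0)).sum = 0 := by
        rw [List.sum_eq_zero]
        intro v hv
        obtain ⟨a, ha, rfl⟩ := List.mem_map.mp hv
        have : x ≠ a := fun he => hc (he ▸ ha)
        simp [this]
      simp [List.map_cons, hz]
    · simp [hx, ih ht]

-- summing the counts of a duplicate-free list of letters counts the members
theorem pv_sum_count (cs : List Char) (h : cs.Nodup) (l : List Char) :
    (cs.map (fun c => (l.count c : Int))).sum
      = ((l.filter (fun x => cs.contains x)).length : Int) := by
  induction l with
  | nil => simp
  | cons x t ih =>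
    have hcnt : ∀ c, ((x :: t).count c : Int)
        = (t.count c : Int) + (if x = c then (1 : Int) else 0) := by
      intro c
      rcases eq_or_ne x c with rfl | hxc
      · simp [List.count_cons]
      · have hb : (c == x) = false := by
          simp only [beq_eq_false_iff_ne, ne_eq]
          exact fun he => hxc he.symm
        simp [List.count_cons, hb, hxc]
    have hsplit : (cs.map (fun c => ((x :: t).count c : Int))).sum
        = (cs.map (fun c => (t.count c : Int))).sum
          + (cs.map (fun c => if x = c then (1 : Int) else 0)).sum := by
      rw [← List.sum_map_add]
      exact congrArg _ (List.map_congr_left (fun c _ => hcnt c))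
    rw [hsplit, ih, pv_sum_indicator x cs h]
    by_cases hm : x ∈ cs
    · simp [hm]
    · simp [hm]

-- the error count is the length minus the good count
theorem pv_final (p : Char → Bool) (l : List Char) :
    ((l.filter (fun x => !p x)).length : Int) = (l.length : Int) - ((l.filter p).length : Int) := by
  have h : (l.filter p).length + (l.filter (fun x => !p x)).length = l.length := by
    induction l with
    | nil => simp
    | cons x t ih =>
      by_cases hx : p x = true <;> simp [List.filter_cons, hx] <;> omega
  omega

-- B's second loop is a sum of counts over the letters
theorem pv_foldl_good (f : Char → Int) (cs : List Char) (g : Int) :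
    cs.foldl (fun g c => g + f c) g = g + (cs.map f).sum := by
  induction cs generalizing g with
  | nil => simp
  | cons c t ih => simp [List.foldl_cons, ih]; ring

-- ===== VERDICT (by name: the statement is the Claim_ definition above) =====
theorem printer_error_spec : Claim_equal_printer_error := by
  intro s _
  unfold Spec_printer_error printer_error printer_error_alt
  simp only [pv_isIn_singleton, PySem.Dict.foldl_insert_getD_add_one_eq_counter,
    PySem.Dict.getD_counter, pv_foldl_good,
    pv_foldl_count_eq_filter_length (fun ch => !"abcdefghijklm".toList.contains ch), zero_add]
  rw [pv_sum_count "abcdefghijklm".toList (by decide)]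
  have hlen : PySem.Str.len s = (s.toList.length : Int) := by simp [PySem.Str.len]
  rw [hlen, pv_final]
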